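-- pv_equiv track=rewrite | github.com/Gaurav7974/cognex | src/substrate/store.py | _escape_fts5_query
-- ===== SOURCE A (Python) =====
-- def _escape_fts5_query(query: str) -> str:
--     """Escape special FTS5 characters and format query."""
--     # Remove FTS5 special characters that could cause syntax errors
--     special_chars = [
--         '"',
--         "'",
--         "(",
--         ")",
--         "*",
--         "-",
--         "+",
--         ":",
--         "^",
--         "{",
--         "}",
--         "[",
--         "]",
--     ]
--     escaped = query
--     for char in special_chars:
--         escaped = escaped.replace(char, " ")
--
--     # Split into words and join with OR for broader matching
--     words = escaped.split()
--     if not words: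
--         return '""'  # Empty query
--
--     # Use prefix matching for each word
--     return " OR ".join(f'"{word}"*' for word in words if word)
-- ===== SOURCE B (Python) =====
-- def _escape_fts5_query(query: str) -> str:
--     """Escape special FTS5 characters and format query (single-pass scan)."""
--     SPECIAL = set('"\'()*-+:^{}[]')
--     words = []
--     buf = []
--     for ch in query:
--         if ch in SPECIAL or ch.isspace():
--             if buf:
--                 words.append(''.join(buf))
--                 buf = []
--         else:
--             buf.append(ch)
--     if buf:
--         words.append(''.join(buf))
--     if not words:
--         return '""'
--     return " OR ".join('"%s"*' % w for w in words)
-- ===== Notes on version B (the rewrite author's own statement) =====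
-- stated objective: alternative
-- what changed: Replaces the 13 full-string .replace passes plus a .split pass with one left-to-right scan that flushes a token buffer at special or whitespace characters.
import Mathlib
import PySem

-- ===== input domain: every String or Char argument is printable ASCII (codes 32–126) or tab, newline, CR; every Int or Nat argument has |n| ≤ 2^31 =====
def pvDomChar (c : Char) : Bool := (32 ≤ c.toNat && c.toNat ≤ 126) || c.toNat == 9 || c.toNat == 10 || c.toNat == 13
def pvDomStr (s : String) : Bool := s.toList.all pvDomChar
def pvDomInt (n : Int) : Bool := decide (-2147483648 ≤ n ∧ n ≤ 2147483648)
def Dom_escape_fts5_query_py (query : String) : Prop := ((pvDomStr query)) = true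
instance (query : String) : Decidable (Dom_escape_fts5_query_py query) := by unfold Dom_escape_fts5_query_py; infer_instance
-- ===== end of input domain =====

-- B replaces A's 13 full-string replace passes + split with a single left-to-right
-- token-buffer scan (objective: alternative decomposition; same asymptotic cost).


-- ===== PORT A =====
-- A: for each of 13 special chars, replace it by a space; then str.split(); join.
def escape_fts5_query_py (query : String) : String :=
  let special_chars : List (List Char) :=
    [['"'], ['\''], ['('], [')'], ['*'], ['-'], ['+'], [':'], ['^'], ['{'], ['}'], ['['], [']']]
  let escaped := special_chars.foldl (fun acc ch => PySem.Chars.replace acc ch [' ']) query.toList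
  let words := PySem.Chars.split₀ escaped
  if words.isEmpty then "\"\""
  else String.mk (PySem.Chars.join " OR ".toList
    ((words.filter (fun w => !w.isEmpty)).map (fun w => '"' :: (w ++ ['"', '*']))))

-- ===== PORT B =====
def altSpecial : List Char := PySem.Set.ofList ['"', '\'', '(', ')', '*', '-', '+', ':', '^', '{', '}', '[', ']']

-- one pass: flush the buffer as a word at each special/whitespace char
def altGo : List Char → List Char → List (List Char) → List (List Char)
  | [], buf, words => (if buf.isEmpty then words else buf.reverse :: words).reverse
  | c :: rest, buf, words =>
    if altSpecial.contains c || PySem.Chars.isspace c then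
      altGo rest [] (if buf.isEmpty then words else buf.reverse :: words)
    else
      altGo rest (c :: buf) words

def escape_fts5_query_py_alt (query : String) : String :=
  let words := altGo query.toList [] []
  if words.isEmpty then "\"\""
  else String.mk (PySem.Chars.join " OR ".toList (words.map (fun w => '"' :: (w ++ ['"', '*']))))

-- ===== PRECONDITION & SPEC =====
def Spec_escape_fts5_query_py (query : String) (out : String) : Prop := out = escape_fts5_query_py_alt query
instance (query : String) (out : String) : Decidable (Spec_escape_fts5_query_py query out) := by unfold Spec_escape_fts5_query_py; infer_instance

-- ===== CLAIM (what is proved, stated in full; the proofs are below) =====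
def Claim_equal_escape_fts5_query_py : Prop := ∀ (query : String), Dom_escape_fts5_query_py query → Spec_escape_fts5_query_py query (escape_fts5_query_py query)

-- ===== LEMMAS AND PROOFS =====

-- replacing one char by one char is a map
def pvRepl (c x : Char) : Char := if x = c then ' ' else x

lemma replace_go_single (c : Char) : ∀ (l : List Char) (acc : List Char) (fuel : Nat),
    l.length ≤ fuel →
    PySem.Chars.replace.go [c] [' '] fuel l acc = acc.reverse ++ l.map (pvRepl c) := by
  intro l
  induction l with
  | nil => intro acc fuel _; cases fuel <;> simp [PySem.Chars.replace.go]
  | cons x t ih =>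
    intro acc fuel hf
    cases fuel with
    | zero => simp at hf
    | succ n =>
      simp only [List.length_cons, Nat.succ_le_succ_iff] at hf
      simp only [PySem.Chars.replace.go]
      by_cases hx : x = c
      · subst hx
        simp [List.isPrefixOf, ih _ _ hf, pvRepl]
      · have : [c].isPrefixOf (x :: t) = false := by
          simp [List.isPrefixOf]; exact fun h => (hx h.symm).elim
        simp [this, ih _ _ hf, pvRepl, hx]

lemma replace_single (c : Char) (s : List Char) :
    PySem.Chars.replace s [c] [' '] = s.map (pvRepl c) := by
  simp [PySem.Chars.replace, List.isEmpty]
  exact replace_go_single c s [] s.length le_rfl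

-- the composite substitution performed by A's 13 replaces
def pvSubst (x : Char) : Char := if altSpecial.contains x then ' ' else x

lemma altSpecial_eq :
    altSpecial = ['"', '\'', '(', ')', '*', '-', '+', ':', '^', '{', '}', '[', ']'] := by decide

lemma mem_altSpecial_iff (x : Char) :
    x ∈ altSpecial ↔ (x = '"' ∨ x = '\'' ∨ x = '(' ∨ x = ')' ∨ x = '*' ∨ x = '-' ∨ x = '+' ∨
      x = ':' ∨ x = '^' ∨ x = '{' ∨ x = '}' ∨ x = '[' ∨ x = ']') := by
  rw [altSpecial_eq]; simp

lemma composite_subst (x : Char) :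
    pvRepl ']' (pvRepl '[' (pvRepl '}' (pvRepl '{' (pvRepl '^' (pvRepl ':' (pvRepl '+'
      (pvRepl '-' (pvRepl '*' (pvRepl ')' (pvRepl '(' (pvRepl '\'' (pvRepl '"' x)))))))))))) = pvSubst x := by
  by_cases h : x ∈ altSpecial
  · rw [mem_altSpecial_iff] at h
    rcases h with h|h|h|h|h|h|h|h|h|h|h|h|h <;> subst h <;> decide
  · have hs : pvSubst x = x := by simp [pvSubst, h]
    rw [hs]
    rw [mem_altSpecial_iff] at h
    simp only [not_or] at h
    obtain ⟨h1,h2,h3,h4,h5,h6,h7,h8,h9,h10,h11,h12,h13⟩ := h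
    simp [pvRepl, h1,h2,h3,h4,h5,h6,h7,h8,h9,h10,h11,h12,h13]

lemma escaped_eq_map (s : List Char) :
    ([['"'], ['\''], ['('], [')'], ['*'], ['-'], ['+'], [':'], ['^'], ['{'], ['}'], ['['], [']']]
      : List (List Char)).foldl (fun acc ch => PySem.Chars.replace acc ch [' ']) s
    = s.map pvSubst := by
  simp only [List.foldl_cons, List.foldl_nil, replace_single, List.map_map]
  refine List.map_congr_left (fun x _ => ?_)
  simp only [Function.comp_apply]
  exact composite_subst x

lemma isspace_subst (c : Char) :
    PySem.Chars.isspace (pvSubst c) = (altSpecial.contains c || PySem.Chars.isspace c) := by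
  unfold pvSubst
  by_cases h : c ∈ altSpecial
  · simp [h]; decide
  · simp [h]

lemma subst_of_not_delim (c : Char) (h : (altSpecial.contains c || PySem.Chars.isspace c) = false) :
    pvSubst c = c := by
  simp only [Bool.or_eq_false_iff, List.contains_eq_mem, decide_eq_false_iff_not] at h
  simp [pvSubst, h.1]

lemma tok_eq : ∀ (s cur : List Char) (acc : List (List Char)),
    PySem.Chars.split₀.go (s.map pvSubst) cur acc = altGo s cur acc := by
  intro s
  induction s with
  | nil =>
    intro cur acc
    simp only [List.map_nil, PySem.Chars.split₀.go, altGo]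
    by_cases h : cur.isEmpty <;> simp [h]
  | cons c rest ih =>
    intro cur acc
    simp only [List.map_cons, PySem.Chars.split₀.go, altGo, isspace_subst]
    by_cases hd : (altSpecial.contains c || PySem.Chars.isspace c) = true
    · simp only [hd, if_true]
      by_cases hc : cur.isEmpty <;> simp [hc, ih]
    · simp only [Bool.not_eq_true] at hd
      simp only [hd, Bool.false_eq_true, if_false, subst_of_not_delim c hd, ih]

lemma altGo_nonempty : ∀ (s cur : List Char) (acc : List (List Char)),
    (∀ w ∈ acc, w ≠ []) →
    ∀ w ∈ altGo s cur acc, w ≠ [] := by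
  intro s
  induction s with
  | nil =>
    intro cur acc hacc w hw
    simp only [altGo] at hw
    by_cases hc : cur.isEmpty
    · simp [hc] at hw; exact hacc w hw
    · simp [hc] at hw
      rcases hw with hE | hE <;>
        first
          | (exact hacc w hE)
          | (subst hE; simpa [List.isEmpty_iff] using hc)
  | cons c rest ih =>
    intro cur acc hacc w hw
    simp only [altGo] at hw
    by_cases hd : (altSpecial.contains c || PySem.Chars.isspace c) = true
    · simp only [hd, if_true] at hw
      refine ih [] _ ?_ w hw
      intro v hv
      by_cases hc : cur.isEmpty
      · simp [hc] at hv; exact hacc v hv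
      · simp [hc] at hv
        rcases hv with hE | hE <;>
          first
            | (exact hacc v hE)
            | (subst hE; simpa [List.isEmpty_iff] using hc)
    · simp only [Bool.not_eq_true] at hd
      simp only [hd, Bool.false_eq_true, if_false] at hw
      exact ih _ _ hacc w hw

lemma filter_altGo (s : List Char) :
    (altGo s [] []).filter (fun w => !w.isEmpty) = altGo s [] [] := by
  apply List.filter_eq_self.mpr
  intro w hw
  have := altGo_nonempty s [] [] (by simp) w hw
  simp [this]

-- ===== VERDICT (by name: the statement is the Claim_ definition above) =====
theorem escape_fts5_query_py_spec : Claim_equal_escape_fts5_query_py := by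
  intro query _
  unfold Spec_escape_fts5_query_py escape_fts5_query_py escape_fts5_query_py_alt
  simp only [escaped_eq_map, PySem.Chars.split₀, tok_eq, filter_altGo]
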